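-- pv_equiv track=rewrite | github.com/zachurban/housing-policy-monitor | legistar_discovery.py | _summarize_votes
-- ===== SOURCE A (Python) =====
-- from typing import Any
--
-- def _summarize_votes(votes: list[dict[str, Any]]) -> str:
--     """Summarize a list of vote records into a readable string."""
--     if not votes:
--         return ""
--     counts: dict[str, int] = {}
--     for v in votes:
--         value = v.get("value", "Unknown")
--         counts[value] = counts.get(value, 0) + 1
--     parts = [f"{val}: {cnt}" for val, cnt in sorted(counts.items())]
--     return ", ".join(parts)
-- ===== SOURCE B (Python) =====
-- def _summarize_votes(votes):
--     """Summarize a list of vote records into a readable string."""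
--     values = sorted(v.get("value", "Unknown") for v in votes)
--     parts = []
--     i = 0
--     while i < len(values):
--         j = i
--         while j < len(values) and values[j] == values[i]:
--             j += 1
--         parts.append(f"{values[i]}: {j - i}")
--         i = j
--     return ", ".join(parts)
-- ===== Notes on version B (the rewrite author's own statement) =====
-- stated objective: alternative
-- what changed: The counting dict is eliminated: B extracts the raw values, sorts them once, and produces the summary by run-length scanning adjacent equal values in the sorted list (no dict, no separate key sort, no special empty case).
import Mathlib
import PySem

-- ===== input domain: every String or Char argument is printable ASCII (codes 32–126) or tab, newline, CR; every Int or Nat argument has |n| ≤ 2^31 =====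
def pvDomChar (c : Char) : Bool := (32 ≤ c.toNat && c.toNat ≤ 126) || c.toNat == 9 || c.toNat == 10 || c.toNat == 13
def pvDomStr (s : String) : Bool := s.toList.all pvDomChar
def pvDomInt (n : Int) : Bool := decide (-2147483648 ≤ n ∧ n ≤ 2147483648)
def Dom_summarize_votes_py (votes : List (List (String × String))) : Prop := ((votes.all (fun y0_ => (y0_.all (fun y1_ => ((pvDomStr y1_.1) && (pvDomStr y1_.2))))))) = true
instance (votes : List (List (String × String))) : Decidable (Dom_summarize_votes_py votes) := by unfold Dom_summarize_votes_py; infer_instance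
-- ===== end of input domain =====

-- B replaces A's counting dict by sort-then-run-length-scan; equivalence of the RETURN value is proved.

-- ===== PORT A =====
-- Python sorts counts.items(), i.e. (str, int) tuples lexicographically: sorted2 with keys fst, snd.
def summarize_votes_py (votes : List (List (String × String))) : String :=
  if votes = [] then ""
  else
    let counts : PySem.Dict String Int :=
      votes.foldl (fun counts v =>
        let value := (PySem.Dict.ofList v).getD "value" "Unknown"
        counts.insert value (counts.getD value 0 + 1)) PySem.Dict.empty
    let parts := (PySem.List.sorted2 counts.items Prod.fst Prod.snd).map
      (fun p => p.1 ++ ": " ++ PySem.Int.toStr p.2)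
    PySem.Str.join ", " parts

-- ===== PORT B =====
-- Source B's inner while loop scans the run of values[i]: j - i = length of the maximal
-- prefix of equal values, and i jumps past it — exactly takeWhile / dropWhile.
def pvRuns : List String → List (String × Int)
  | [] => []
  | x :: xs =>
    (x, 1 + ((xs.takeWhile (fun y => y == x)).length : Int)) ::
      pvRuns (xs.dropWhile (fun y => y == x))
termination_by L => L.length
decreasing_by
  exact Nat.lt_succ_of_le (List.dropWhile_sublist _).length_le

def summarize_votes_py_alt (votes : List (List (String × String))) : String :=
  let values := PySem.List.sorted
    (votes.map (fun v => (PySem.Dict.ofList v).getD "value" "Unknown")) (fun x => x)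
  PySem.Str.join ", "
    ((pvRuns values).map (fun p => p.1 ++ ": " ++ PySem.Int.toStr p.2))

-- ===== PRECONDITION & SPEC =====
def Spec_summarize_votes_py (votes : List (List (String × String))) (out : String) : Prop := out = summarize_votes_py_alt votes
instance (votes : List (List (String × String))) (out : String) : Decidable (Spec_summarize_votes_py votes out) := by unfold Spec_summarize_votes_py; infer_instance

-- ===== CLAIM (what is proved, stated in full; the proofs are below) =====
def Claim_equal_summarize_votes_py : Prop := ∀ (votes : List (List (String × String))), Dom_summarize_votes_py votes → Spec_summarize_votes_py votes (summarize_votes_py votes)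

-- ===== LEMMAS AND PROOFS =====

-- insertBy with two `before` tests that agree against every element of ys inserts at the same place
theorem pv_insertBy_congr {α : Type} (b1 b2 : α → α → Bool) (x : α) (ys : List α)
    (h : ∀ y ∈ ys, b1 x y = b2 x y) :
    PySem.List.insertBy b1 x ys = PySem.List.insertBy b2 x ys := by
  induction ys with
  | nil => rfl
  | cons y ys ih =>
    simp only [PySem.List.insertBy, h y (by simp)]
    split
    · rfl
    · simp only [List.cons.injEq, true_and]
      exact ih (fun z hz => h z (by simp [hz]))

-- a fold of insertBy only ever compares elements drawn from the input, so the tests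
-- need only agree there
theorem pv_foldl_insertBy_congr {α : Type} (b1 b2 : α → α → Bool) (S : List α)
    (h : ∀ a ∈ S, ∀ b ∈ S, b1 a b = b2 a b) :
    ∀ (xs acc : List α), (∀ a ∈ xs, a ∈ S) → (∀ a ∈ acc, a ∈ S) →
      xs.foldl (fun acc x => PySem.List.insertBy b1 x acc) acc
        = xs.foldl (fun acc x => PySem.List.insertBy b2 x acc) acc := by
  intro xs
  induction xs with
  | nil => intro acc _ _; rfl
  | cons x xs ih =>
    intro acc hxs hacc
    have hx : x ∈ S := hxs x (by simp)
    simp only [List.foldl_cons]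
    rw [pv_insertBy_congr b1 b2 x acc (fun y hy => h x hx y (hacc y hy))]
    exact ih _ (fun a ha => hxs a (by simp [ha]))
      (fun a ha => by
        rcases (PySem.List.insertBy_mem_iff b2 x a acc).mp ha with rfl | ha
        · exact hx
        · exact hacc a ha)

-- every first component produced by pvRuns is an element of the list
theorem pv_runs_fst_mem : ∀ (L : List String), ∀ p ∈ pvRuns L, p.1 ∈ L := by
  intro L
  induction L using pvRuns.induct with
  | case1 => intro p hp; rw [pvRuns] at hp; exact absurd hp (by simp)
  | case2 x xs ih =>
    intro p hp
    rw [pvRuns] at hp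
    rcases List.mem_cons.mp hp with rfl | hp
    · simp
    · exact List.mem_cons_of_mem _ ((List.dropWhile_sublist _).mem (ih p hp))

-- dropping the leading run of x from a sorted tail leaves no x behind
theorem pv_not_mem_dropWhile (x : String) (xs : List String)
    (hle : ∀ y ∈ xs, x ≤ y) (hp : xs.Pairwise (· ≤ ·)) :
    x ∉ xs.dropWhile (fun y => y == x) := by
  induction xs with
  | nil => exact fun h => List.not_mem_nil h
  | cons y ys ih =>
    rw [List.dropWhile_cons]
    split
    · exact ih (fun z hz => hle z (by simp [hz])) hp.tail
    · rename_i hne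
      have hxney : x ≠ y := fun h => hne (by simp [h])
      have hxy : x < y := lt_of_le_of_ne (hle y (by simp)) hxney
      intro hmem
      rcases List.mem_cons.mp hmem with h | hmem
      · exact hxney h
      · exact absurd (lt_of_lt_of_le hxy ((List.pairwise_cons.mp hp).1 x hmem)) (lt_irrefl x)

theorem pv_discard_of_not_mem (x : String) (d : List String) (hx : x ∉ d) :
    (PySem.Set.ofList d).discard x = PySem.Set.ofList d := by
  apply List.filter_eq_self.mpr
  intro y hy
  have hyd : y ∈ d := (PySem.Set.mem_ofList d y).mp hy
  have hne : y ≠ x := fun h => hx (h ▸ hyd)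
  simpa using hne

-- first occurrences of x :: (run of x ++ rest without x)
theorem pv_ofList_run (x : String) (d : List String) (hx : x ∉ d) :
    ∀ t : List String, (∀ y ∈ t, y = x) →
      PySem.Set.ofList (x :: (t ++ d)) = x :: PySem.Set.ofList d := by
  intro t
  induction t with
  | nil =>
    intro _
    rw [List.nil_append, PySem.Set.ofList_cons, pv_discard_of_not_mem x d hx]
  | cons y t ih =>
    intro ht
    have hy : y = x := ht y (by simp)
    subst hy
    have := ih (fun z hz => ht z (by simp [hz]))
    rw [List.cons_append, PySem.Set.ofList_cons, PySem.Set.ofList_cons] at *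
    rw [show PySem.Set.discard (y :: (PySem.Set.ofList (t ++ d)).discard y) y
          = (PySem.Set.ofList (t ++ d)).discard y by
        simp [PySem.Set.discard, List.filter_filter]]
    exact this

-- run-length scan of a sorted list = its distinct values (in order) with their counts
theorem pv_runs_eq : ∀ (L : List String), L.Pairwise (· ≤ ·) →
    pvRuns L = (PySem.Set.ofList L).map (fun k => (k, (L.count k : Int))) := by
  intro L
  induction L using pvRuns.induct with
  | case1 => intro _; rw [pvRuns]; rfl
  | case2 x xs ih =>
    intro hp
    have hle : ∀ y ∈ xs, x ≤ y := (List.pairwise_cons.mp hp).1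
    have hpxs : xs.Pairwise (· ≤ ·) := hp.tail
    set t := xs.takeWhile (fun y => y == x) with ht
    set d := xs.dropWhile (fun y => y == x) with hd
    have hsplit : t ++ d = xs := List.takeWhile_append_dropWhile
    have htall : ∀ y ∈ t, y = x := by
      intro y hy
      have := List.mem_takeWhile_imp hy
      simpa using this
    have hxd : x ∉ d := pv_not_mem_dropWhile x xs hle hpxs
    have hpd : d.Pairwise (· ≤ ·) := hpxs.sublist (List.dropWhile_sublist _)
    have hof : PySem.Set.ofList (x :: xs) = x :: PySem.Set.ofList d := by
      rw [← hsplit]; exact pv_ofList_run x d hxd t htall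
    have hcx : ((x :: xs).count x : Int) = 1 + (t.length : Int) := by
      rw [← hsplit, List.count_cons_self, List.count_append]
      have h1 : t.count x = t.length := List.count_eq_length.mpr (fun b hb => (htall b hb).symm)
      have h2 : d.count x = 0 := List.count_eq_zero.mpr hxd
      omega
    have hck : ∀ k ∈ PySem.Set.ofList d, (d.count k : Int) = ((x :: xs).count k : Int) := by
      intro k hk
      have hkd : k ∈ d := (PySem.Set.mem_ofList d k).mp hk
      have hkx : k ≠ x := fun h => hxd (h ▸ hkd)
      rw [← hsplit, List.count_cons_of_ne (Ne.symm hkx), List.count_append,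
        List.count_eq_zero.mpr (fun hkt => hkx (htall k hkt)), Nat.zero_add]
    rw [pvRuns, hof, List.map_cons, ih hpd, hcx]
    congr 1
    exact List.map_congr_left (fun k hk => by rw [hck k hk])

-- the runs of a sorted list have strictly increasing first components
theorem pv_runs_pairwise : ∀ (L : List String), L.Pairwise (· ≤ ·) →
    (pvRuns L).Pairwise (fun a b => a.1 < b.1) := by
  intro L
  induction L using pvRuns.induct with
  | case1 => intro _; rw [pvRuns]; simp
  | case2 x xs ih =>
    intro hp
    have hle : ∀ y ∈ xs, x ≤ y := (List.pairwise_cons.mp hp).1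
    have hpxs : xs.Pairwise (· ≤ ·) := hp.tail
    have hxd : x ∉ xs.dropWhile (fun y => y == x) := pv_not_mem_dropWhile x xs hle hpxs
    have hpd : (xs.dropWhile (fun y => y == x)).Pairwise (· ≤ ·) :=
      hpxs.sublist (List.dropWhile_sublist _)
    rw [pvRuns]
    refine List.pairwise_cons.mpr ⟨?_, ih hpd⟩
    intro p hp'
    have hmem : p.1 ∈ xs.dropWhile (fun y => y == x) := pv_runs_fst_mem _ p hp'
    have hlex : x ≤ p.1 := hle _ ((List.dropWhile_sublist _).mem hmem)
    have hne : x ≠ p.1 := fun h => hxd (h.symm ▸ hmem)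
    exact lt_of_le_of_ne hlex hne

-- sorted2 on pairs with pairwise-distinct first components = sort by first component
theorem pv_sorted2_items (S : List String) (c : String → Int) :
    PySem.List.sorted2 (S.map (fun k => (k, c k))) Prod.fst Prod.snd
      = PySem.List.sorted (S.map (fun k => (k, c k))) (fun p => p.1) := by
  have hagree : ∀ a ∈ S.map (fun k => (k, c k)), ∀ b ∈ S.map (fun k => (k, c k)),
      (fun a b : String × Int =>
        decide (a.1 < b.1) || (!decide (b.1 < a.1) && decide (a.2 < b.2))) a b
      = (fun a b : String × Int => decide (a.1 < b.1)) a b := by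
    intro a ha b hb
    rcases List.mem_map.mp ha with ⟨k1, _, rfl⟩
    rcases List.mem_map.mp hb with ⟨k2, _, rfl⟩
    rcases lt_trichotomy k1 k2 with h | h | h
    · simp [h]
    · subst h; simp
    · simp [h, lt_asymm h]
  calc PySem.List.sorted2 (S.map (fun k => (k, c k))) Prod.fst Prod.snd
      = (S.map (fun k => (k, c k))).foldl (fun acc x => PySem.List.insertBy
          (fun a b : String × Int =>
            decide (a.1 < b.1) || (!decide (b.1 < a.1) && decide (a.2 < b.2))) x acc) [] := rfl
    _ = (S.map (fun k => (k, c k))).foldl (fun acc x => PySem.List.insertBy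
          (fun a b : String × Int => decide (a.1 < b.1)) x acc) [] :=
        pv_foldl_insertBy_congr _ _ (S.map (fun k => (k, c k))) hagree _ []
          (fun a ha => ha) (by simp)
    _ = PySem.List.sorted (S.map (fun k => (k, c k))) (fun p => p.1) :=
        (PySem.List.sorted_eq_foldl_insertBy _ _).symm

-- ===== VERDICT (by name: the statement is the Claim_ definition above) =====
theorem summarize_votes_py_spec : Claim_equal_summarize_votes_py := by
  intro votes _
  unfold Spec_summarize_votes_py summarize_votes_py summarize_votes_py_alt
  by_cases hv : votes = []
  · subst hv
    rw [if_pos rfl]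
    simp only [List.map_nil]
    rw [show PySem.List.sorted ([] : List String) (fun x => x) = [] from rfl]
    rw [pvRuns]
    rfl
  · rw [if_neg hv]
    refine congrArg (PySem.Str.join ", ") (congrArg (List.map _) ?_)
    have hcount : (votes.foldl (fun (counts : PySem.Dict String Int) v =>
          let value := (PySem.Dict.ofList v).getD "value" "Unknown"
          counts.insert value (counts.getD value 0 + 1)) PySem.Dict.empty)
        = PySem.Dict.counter (votes.map (fun v => (PySem.Dict.ofList v).getD "value" "Unknown")) :=
      (List.foldl_map
        (f := fun v => (PySem.Dict.ofList v).getD "value" "Unknown")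
        (g := fun (d : PySem.Dict String Int) x => d.insert x (d.getD x 0 + 1))
        (l := votes) (init := PySem.Dict.empty)).symm.trans
        (PySem.Dict.foldl_insert_getD_add_one_eq_counter _)
    rw [hcount, PySem.Dict.items_counter, pv_sorted2_items]
    -- both sides now describe the distinct values in increasing order with their counts
    have hLp : (PySem.List.sorted (votes.map (fun v => (PySem.Dict.ofList v).getD "value" "Unknown"))
        (fun x => x)).Pairwise (· ≤ ·) := PySem.List.sorted_pairwise _ _
    have hperm : (pvRuns (PySem.List.sorted (votes.map (fun v => (PySem.Dict.ofList v).getD "value" "Unknown"))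
        (fun x => x))).Perm
        ((PySem.Set.ofList (votes.map (fun v => (PySem.Dict.ofList v).getD "value" "Unknown"))).map
          (fun k => (k, ((votes.map (fun v => (PySem.Dict.ofList v).getD "value" "Unknown")).count k : Int)))) := by
      rw [pv_runs_eq _ hLp]
      rw [List.map_congr_left (fun k _ => by
        rw [(PySem.List.sorted_perm (votes.map (fun v => (PySem.Dict.ofList v).getD "value" "Unknown"))
          (fun x => x) false).count_eq k])]
      exact ((List.perm_ext_iff_of_nodup (PySem.Set.nodup_ofList _) (PySem.Set.nodup_ofList _)).mpr
        (fun a => by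
          rw [PySem.Set.mem_ofList, PySem.Set.mem_ofList,
            (PySem.List.sorted_perm _ (fun x => x) false).mem_iff])).map _
    exact (PySem.List.sorted_eq_of_perm_of_pairwise_lt _ _ _ hperm
      (pv_runs_pairwise _ hLp))
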